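-- pv_equiv track=rewrite | github.com/swth1991/ApplyCrypto | src/generator/endpoint_report_generator.py | map_changed_lines_to_methods
-- ===== SOURCE A (Python) =====
-- from typing import List, Dict, Optional, Set, Tuple
--
-- def map_changed_lines_to_methods(changed_lines: Set[int], method_ranges: List[Tuple[Tuple[int, int], str]]) -> Set[str]:
--     """
--     변경된 라인이 속한 메소드를 식별합니다.
--
--     Args:
--         changed_lines: 변경된 라인 인덱스 (0-based)
--         method_ranges: [((시작라인, 종료라인), 메소드명)] 리스트
--
--     Returns:
--         Set[str]: 변경된 메소드명 집합
--     """
--     changed_methods = set()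
--
--     for line_idx in changed_lines:
--         for (start_line, end_line), method_name in method_ranges:
--             if start_line <= line_idx+1 <= end_line:
--                 changed_methods.add(method_name)
--                 break
--
--     return changed_methods
-- ===== SOURCE B (Python) =====
-- def map_changed_lines_to_methods(changed_lines, method_ranges):
--     # Range-outer pass: each changed line is claimed by the first range (in
--     # list order) that contains it; then one pass over the lines collects the
--     # owning methods.  No inner break needed.
--     owner = {}
--     for (start_line, end_line), method_name in method_ranges:
--         for line_idx in changed_lines:
--             if line_idx not in owner and start_line <= line_idx + 1 <= end_line:
--                 owner[line_idx] = method_name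
--     return {owner[line_idx] for line_idx in changed_lines if line_idx in owner}
-- ===== Notes on version B (the rewrite author's own statement) =====
-- stated objective: alternative
-- what changed: B inverts the loop nesting: instead of scanning ranges per line with a break, it makes one range-outer pass that assigns each line to its first containing range via an ownership dict, then collects the owners in a final pass.
import Mathlib
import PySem

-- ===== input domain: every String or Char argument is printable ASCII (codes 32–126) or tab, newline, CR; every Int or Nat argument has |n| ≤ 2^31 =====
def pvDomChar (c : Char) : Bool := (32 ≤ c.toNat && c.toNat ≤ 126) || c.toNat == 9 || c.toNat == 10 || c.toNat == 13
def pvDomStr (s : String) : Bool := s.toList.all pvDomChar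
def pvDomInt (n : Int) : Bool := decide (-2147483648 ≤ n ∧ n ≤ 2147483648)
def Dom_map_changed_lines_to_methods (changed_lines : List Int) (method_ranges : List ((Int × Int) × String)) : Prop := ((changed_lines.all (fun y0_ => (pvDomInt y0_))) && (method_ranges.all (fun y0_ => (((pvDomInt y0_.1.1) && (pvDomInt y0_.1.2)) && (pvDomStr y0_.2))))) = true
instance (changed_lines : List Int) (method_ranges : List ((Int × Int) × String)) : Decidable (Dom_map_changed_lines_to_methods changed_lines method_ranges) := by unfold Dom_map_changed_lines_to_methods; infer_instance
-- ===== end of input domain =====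

-- B replaces A's line-outer scan-with-break by a range-outer ownership-dict pass plus a collection pass; objective: alternative structure, same cost.


-- ===== PORT A =====
-- the inner 'for (start,end),name in method_ranges: if …: add; break' of A
def pvAScan (line_idx : Int) (acc : PySem.Set String) : List ((Int × Int) × String) → PySem.Set String
  | [] => acc
  | ((s, e), name) :: rest =>
    if s ≤ line_idx + 1 ∧ line_idx + 1 ≤ e then PySem.Set.add acc name
    else pvAScan line_idx acc rest

def map_changed_lines_to_methods (changed_lines : List Int) (method_ranges : List ((Int × Int) × String)) : List String :=
  changed_lines.foldl (fun acc line_idx => pvAScan line_idx acc method_ranges) PySem.Set.empty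

-- ===== PORT B =====
def map_changed_lines_to_methods_alt (changed_lines : List Int) (method_ranges : List ((Int × Int) × String)) : List String :=
  let owner : PySem.Dict Int String :=
    method_ranges.foldl
      (fun d r =>
        changed_lines.foldl
          (fun d line_idx =>
            if ¬ d.contains line_idx ∧ r.1.1 ≤ line_idx + 1 ∧ line_idx + 1 ≤ r.1.2 then
              d.insert line_idx r.2
            else d)
          d)
      PySem.Dict.empty
  changed_lines.foldl
    (fun acc line_idx =>
      match owner.get? line_idx with
      | some m => PySem.Set.add acc m
      | none => acc)
    PySem.Set.empty

-- ===== PRECONDITION & SPEC =====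
def Spec_map_changed_lines_to_methods (changed_lines : List Int) (method_ranges : List ((Int × Int) × String)) (out : List String) : Prop := out = map_changed_lines_to_methods_alt changed_lines method_ranges
instance (changed_lines : List Int) (method_ranges : List ((Int × Int) × String)) (out : List String) : Decidable (Spec_map_changed_lines_to_methods changed_lines method_ranges out) := by unfold Spec_map_changed_lines_to_methods; infer_instance

-- ===== CLAIM (what is proved, stated in full; the proofs are below) =====
def Claim_equal_map_changed_lines_to_methods : Prop := ∀ (changed_lines : List Int) (method_ranges : List ((Int × Int) × String)), Dom_map_changed_lines_to_methods changed_lines method_ranges → Spec_map_changed_lines_to_methods changed_lines method_ranges (map_changed_lines_to_methods changed_lines method_ranges)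

-- ===== LEMMAS AND PROOFS =====

-- the method of the first range (in method_ranges order) containing line l, if any
def pvFirst (l : Int) : List ((Int × Int) × String) → Option String
  | [] => none
  | ((s, e), name) :: rest => if s ≤ l + 1 ∧ l + 1 ≤ e then some name else pvFirst l rest

-- A's inner scan adds exactly the first matching method
theorem pvAScan_eq_first (l : Int) (acc : PySem.Set String) (rs : List ((Int × Int) × String)) :
    pvAScan l acc rs = match pvFirst l rs with
      | some m => PySem.Set.add acc m
      | none => acc := by
  induction rs with
  | nil => rfl
  | cons r rest ih =>
    obtain ⟨⟨s, e⟩, name⟩ := r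
    simp only [pvAScan, pvFirst]
    split_ifs with h
    · rfl
    · exact ih

-- B's inner pass over the lines for ONE range claims exactly the unclaimed lines in that range
theorem pvInner_get? (lines : List Int) (s e : Int) (name : String)
    (d : PySem.Dict Int String) (k : Int) :
    (lines.foldl
      (fun d line_idx =>
        if ¬ d.contains line_idx ∧ s ≤ line_idx + 1 ∧ line_idx + 1 ≤ e then
          d.insert line_idx name
        else d) d).get? k =
    if k ∈ lines ∧ d.get? k = none ∧ s ≤ k + 1 ∧ k + 1 ≤ e then some name
    else d.get? k := by
  induction lines generalizing d with
  | nil => simp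
  | cons l ls ih =>
    rw [List.foldl_cons, ih]
    by_cases hstep : ¬ d.contains l = true ∧ s ≤ l + 1 ∧ l + 1 ≤ e
    · rw [if_pos hstep]
      have hgetl : d.get? l = none :=
        (PySem.Dict.get?_eq_none_iff_contains d l).mpr (by simpa using hstep.1)
      by_cases hk : k = l
      · subst hk
        rw [PySem.Dict.get?_insert_self, if_neg (by simp),
            if_pos ⟨List.mem_cons_self, hgetl, hstep.2⟩]
      · rw [PySem.Dict.get?_insert_of_ne d name hk]
        simp [List.mem_cons, hk]
    · rw [if_neg hstep]
      by_cases hk : k = l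
      · subst hk
        rcases not_and_or.mp hstep with h1 | h2
        · have hget : d.get? k ≠ none := by
            intro hno
            rw [PySem.Dict.get?_eq_none_iff_contains] at hno
            simp [hno] at h1
          rw [if_neg (by tauto), if_neg (by tauto)]
        · rw [if_neg (by tauto), if_neg (by tauto)]
      · simp [List.mem_cons, hk]

-- B's whole range-outer fold: a line of the input ends up owned by its first matching range
theorem pvOwner_get? (lines : List Int) (rs : List ((Int × Int) × String))
    (d : PySem.Dict Int String) (k : Int) (hk : k ∈ lines) :
    (rs.foldl
      (fun d r =>
        lines.foldl
          (fun d line_idx =>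
            if ¬ d.contains line_idx ∧ r.1.1 ≤ line_idx + 1 ∧ line_idx + 1 ≤ r.1.2 then
              d.insert line_idx r.2
            else d)
          d) d).get? k = (d.get? k).or (pvFirst k rs) := by
  induction rs generalizing d with
  | nil => simp [pvFirst]
  | cons r rest ih =>
    obtain ⟨⟨s, e⟩, name⟩ := r
    rw [List.foldl_cons, ih, pvInner_get?]
    cases hd : d.get? k with
    | some v => rw [if_neg (by simp), Option.some_or, Option.some_or]
    | none =>
      simp only [pvFirst, Option.none_or]
      by_cases hcond : s ≤ k + 1 ∧ k + 1 ≤ e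
      · rw [if_pos ⟨hk, trivial, hcond⟩, if_pos hcond, Option.some_or]
      · rw [if_neg (by tauto), if_neg hcond, Option.none_or]

-- ===== VERDICT (by name: the statement is the Claim_ definition above) =====
theorem map_changed_lines_to_methods_spec : Claim_equal_map_changed_lines_to_methods := by
  intro changed_lines method_ranges _
  unfold Spec_map_changed_lines_to_methods
  simp only [map_changed_lines_to_methods, map_changed_lines_to_methods_alt]
  refine PySem.List.foldl_congr_mem _ _ _ _ ?_
  intro acc l hl
  rw [pvAScan_eq_first,
      pvOwner_get? changed_lines method_ranges PySem.Dict.empty l hl,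
      PySem.Dict.get?_empty, Option.none_or]
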